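-- pv_equiv track=rewrite | github.com/rickhallett/blackcore | blackcore/minimal/tests/utils/semantic_validators.py | _is_valid_relationship
-- ===== SOURCE A (Python) =====
-- from typing import Dict, List, Any, Optional, Tuple
--
-- def _is_valid_relationship(source: Dict, target: Dict, rel_type: str) -> bool:
--     """Check if a relationship type makes sense between two entity types."""
--     valid_relationships = {
--         ("person", "organization"): ["works_at", "owns", "founded", "manages"],
--         ("person", "person"): ["knows", "reports_to", "married_to", "related_to"],
--         ("organization", "organization"): ["subsidiary_of", "partner_with", "competes_with"],
--         ("person", "event"): ["attended", "organized", "spoke_at"],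
--         ("organization", "place"): ["located_at", "operates_in"],
--         ("person", "transgression"): ["committed", "reported", "investigated"],
--     }
--
--     source_type = source.get("type", "").lower()
--     target_type = target.get("type", "").lower()
--
--     # Check both directions
--     for (s, t), valid_rels in valid_relationships.items():
--         if (source_type == s and target_type == t) or (source_type == t and target_type == s):
--             if rel_type.lower() in [r.lower() for r in valid_rels]:
--                 return True
--
--     return False
-- ===== SOURCE B (Python) =====
-- # B: prebuilt bidirectional index from (source_type, target_type) to the frozenset of
-- # valid relationship names; one dict lookup replaces A's loop over the table and its
-- # both-directions branch.
--
-- _TABLE = {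
--     ("person", "organization"): ["works_at", "owns", "founded", "manages"],
--     ("person", "person"): ["knows", "reports_to", "married_to", "related_to"],
--     ("organization", "organization"): ["subsidiary_of", "partner_with", "competes_with"],
--     ("person", "event"): ["attended", "organized", "spoke_at"],
--     ("organization", "place"): ["located_at", "operates_in"],
--     ("person", "transgression"): ["committed", "reported", "investigated"],
-- }
--
-- _VALID = {}
-- for (_s, _t), _rels in _TABLE.items():
--     _fs = frozenset(r.lower() for r in _rels)
--     _VALID[(_s, _t)] = _fs
--     _VALID[(_t, _s)] = _fs
--
--
-- def _is_valid_relationship(source, target, rel_type):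
--     key = (source.get("type", "").lower(), target.get("type", "").lower())
--     return rel_type.lower() in _VALID.get(key, frozenset())
-- ===== Notes on version B (the rewrite author's own statement) =====
-- stated objective: simpler
-- what changed: Replaces A's per-call loop over the table with its both-directions branch by a module-level bidirectional dict indexed by the ordered (source_type, target_type) pair mapping to a frozenset of lowercased relationship names, so the body is a single lookup plus a membership test.
import Mathlib
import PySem

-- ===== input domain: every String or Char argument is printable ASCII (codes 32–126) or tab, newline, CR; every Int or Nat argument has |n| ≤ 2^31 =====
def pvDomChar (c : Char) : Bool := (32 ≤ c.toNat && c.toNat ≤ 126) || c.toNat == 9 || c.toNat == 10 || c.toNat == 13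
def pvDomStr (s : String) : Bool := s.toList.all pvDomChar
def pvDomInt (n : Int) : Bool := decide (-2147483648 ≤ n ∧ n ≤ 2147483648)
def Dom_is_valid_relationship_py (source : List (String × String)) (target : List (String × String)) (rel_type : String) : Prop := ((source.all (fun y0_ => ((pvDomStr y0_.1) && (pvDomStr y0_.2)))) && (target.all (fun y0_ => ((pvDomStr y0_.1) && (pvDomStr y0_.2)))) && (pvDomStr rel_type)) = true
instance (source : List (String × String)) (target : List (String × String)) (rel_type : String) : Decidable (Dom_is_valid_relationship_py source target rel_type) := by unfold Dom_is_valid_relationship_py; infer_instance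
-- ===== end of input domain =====

-- ===== PORT A =====
-- B replaces A's per-call loop over the relationship table (with its both-directions
-- branch) by a prebuilt bidirectional dict lookup: simpler body, same results.

-- the table literal of A (keys as ordered pairs, values the relationship-name lists)
def pvTable : List ((String × String) × List String) :=
  [ (("person", "organization"), ["works_at", "owns", "founded", "manages"]),
    (("person", "person"), ["knows", "reports_to", "married_to", "related_to"]),
    (("organization", "organization"), ["subsidiary_of", "partner_with", "competes_with"]),
    (("person", "event"), ["attended", "organized", "spoke_at"]),
    (("organization", "place"), ["located_at", "operates_in"]),
    (("person", "transgression"), ["committed", "reported", "investigated"]) ]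

-- the 'for (s, t), valid_rels in valid_relationships.items():' loop with its early return
def pvLoopA (st tt rl : String) : List ((String × String) × List String) → Bool
  | [] => false
  | ((s, t), rels) :: rest =>
    if (st == s && tt == t) || (st == t && tt == s) then
      if (rels.map PySem.Str.lower).contains rl then true
      else pvLoopA st tt rl rest
    else pvLoopA st tt rl rest

def is_valid_relationship_py (source : List (String × String)) (target : List (String × String)) (rel_type : String) : Bool :=
  let source_type := PySem.Str.lower (PySem.Dict.getD (PySem.Dict.mk source) "type" "")
  let target_type := PySem.Str.lower (PySem.Dict.getD (PySem.Dict.mk target) "type" "")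
  pvLoopA source_type target_type (PySem.Str.lower rel_type) pvTable

-- ===== PORT B =====
-- module-level build loop of Source B: both directions of each table entry, values as sets
def pvValid : PySem.Dict (String × String) (PySem.Set String) :=
  pvTable.foldl
    (fun d e =>
      let fs := PySem.Set.ofList (e.2.map PySem.Str.lower)
      PySem.Dict.insert (PySem.Dict.insert d (e.1.1, e.1.2) fs) (e.1.2, e.1.1) fs)
    (PySem.Dict.mk [])

def is_valid_relationship_py_alt (source : List (String × String)) (target : List (String × String)) (rel_type : String) : Bool :=
  let key := (PySem.Str.lower (PySem.Dict.getD (PySem.Dict.mk source) "type" ""),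
              PySem.Str.lower (PySem.Dict.getD (PySem.Dict.mk target) "type" ""))
  PySem.Set.contains (PySem.Dict.getD pvValid key PySem.Set.empty) (PySem.Str.lower rel_type)

-- ===== PRECONDITION & SPEC =====
def Spec_is_valid_relationship_py (source : List (String × String)) (target : List (String × String)) (rel_type : String) (out : Bool) : Prop := out = is_valid_relationship_py_alt source target rel_type
instance (source : List (String × String)) (target : List (String × String)) (rel_type : String) (out : Bool) : Decidable (Spec_is_valid_relationship_py source target rel_type out) := by unfold Spec_is_valid_relationship_py; infer_instance

-- ===== CLAIM (what is proved, stated in full; the proofs are below) =====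
def Claim_equal_is_valid_relationship_py : Prop := ∀ (source : List (String × String)) (target : List (String × String)) (rel_type : String), Dom_is_valid_relationship_py source target rel_type → Spec_is_valid_relationship_py source target rel_type (is_valid_relationship_py source target rel_type)

-- ===== LEMMAS AND PROOFS =====
-- core pointwise fact: the loop over the table equals the lookup in the bidirectional index
-- (a,b) == (c,d) componentwise, used to reduce the key comparisons of the B-side lookup
theorem pv_prod_beq (a b c d : String) : ((a, b) == (c, d)) = (a == c && b == d) := rfl


set_option maxHeartbeats 4000000 in
set_option maxRecDepth 16384 in
theorem pvCore (st tt rl : String) :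
    pvLoopA st tt rl pvTable
      = PySem.Set.contains (PySem.Dict.getD pvValid (st, tt) PySem.Set.empty) rl := by
  have hlow : (["works_at", "owns", "founded", "manages"].map PySem.Str.lower
      = ["works_at", "owns", "founded", "manages"])
    ∧ (["knows", "reports_to", "married_to", "related_to"].map PySem.Str.lower
      = ["knows", "reports_to", "married_to", "related_to"])
    ∧ (["subsidiary_of", "partner_with", "competes_with"].map PySem.Str.lower
      = ["subsidiary_of", "partner_with", "competes_with"])
    ∧ (["attended", "organized", "spoke_at"].map PySem.Str.lower
      = ["attended", "organized", "spoke_at"])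
    ∧ (["located_at", "operates_in"].map PySem.Str.lower
      = ["located_at", "operates_in"])
    ∧ (["committed", "reported", "investigated"].map PySem.Str.lower
      = ["committed", "reported", "investigated"]) := by decide
  obtain ⟨h1, h2, h3, h4, h5, h6⟩ := hlow
  have hv : pvValid = PySem.Dict.mk
      [(("person", "organization"), ["works_at", "owns", "founded", "manages"]),
       (("organization", "person"), ["works_at", "owns", "founded", "manages"]),
       (("person", "person"), ["knows", "reports_to", "married_to", "related_to"]),
       (("organization", "organization"), ["subsidiary_of", "partner_with", "competes_with"]),
       (("person", "event"), ["attended", "organized", "spoke_at"]),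
       (("event", "person"), ["attended", "organized", "spoke_at"]),
       (("organization", "place"), ["located_at", "operates_in"]),
       (("place", "organization"), ["located_at", "operates_in"]),
       (("person", "transgression"), ["committed", "reported", "investigated"]),
       (("transgression", "person"), ["committed", "reported", "investigated"])] := by rfl
  rw [hv]
  simp only [pvTable, pvLoopA, h1, h2, h3, h4, h5, h6, PySem.Dict.getD,
    PySem.Dict.get?_mk_cons, PySem.Dict.get?]
  clear hv h1 h2 h3 h4 h5 h6
  by_cases e1 : st = "person"
  · subst e1
    by_cases f1 : tt = "person"
    · subst f1; simp [pv_prod_beq, beq_iff_eq]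
    · by_cases f2 : tt = "organization"
      · subst f2; simp [pv_prod_beq, beq_iff_eq]
      · by_cases f3 : tt = "event"
        · subst f3; simp [pv_prod_beq, beq_iff_eq]
        · by_cases f4 : tt = "place"
          · subst f4; simp [pv_prod_beq, beq_iff_eq]
          · by_cases f5 : tt = "transgression"
            · subst f5; simp [pv_prod_beq, beq_iff_eq]
            ·
              have g1 : ¬ ("person" = tt) := fun h => f1 h.symm
              have g2 : ¬ ("organization" = tt) := fun h => f2 h.symm
              have g3 : ¬ ("event" = tt) := fun h => f3 h.symm
              have g4 : ¬ ("place" = tt) := fun h => f4 h.symm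
              have g5 : ¬ ("transgression" = tt) := fun h => f5 h.symm
              simp_all [pv_prod_beq, beq_iff_eq]
  · by_cases e2 : st = "organization"
    · subst e2
      by_cases f1 : tt = "person"
      · subst f1; simp [pv_prod_beq, beq_iff_eq]
      · by_cases f2 : tt = "organization"
        · subst f2; simp [pv_prod_beq, beq_iff_eq]
        · by_cases f3 : tt = "event"
          · subst f3; simp [pv_prod_beq, beq_iff_eq]
          · by_cases f4 : tt = "place"
            · subst f4; simp [pv_prod_beq, beq_iff_eq]
            · by_cases f5 : tt = "transgression"
              · subst f5; simp [pv_prod_beq, beq_iff_eq]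
              ·
                have g1 : ¬ ("person" = tt) := fun h => f1 h.symm
                have g2 : ¬ ("organization" = tt) := fun h => f2 h.symm
                have g3 : ¬ ("event" = tt) := fun h => f3 h.symm
                have g4 : ¬ ("place" = tt) := fun h => f4 h.symm
                have g5 : ¬ ("transgression" = tt) := fun h => f5 h.symm
                simp_all [pv_prod_beq, beq_iff_eq]
    · by_cases e3 : st = "event"
      · subst e3
        by_cases f1 : tt = "person"
        · subst f1; simp [pv_prod_beq, beq_iff_eq]
        · by_cases f2 : tt = "organization"
          · subst f2; simp [pv_prod_beq, beq_iff_eq]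
          · by_cases f3 : tt = "event"
            · subst f3; simp [pv_prod_beq, beq_iff_eq]
            · by_cases f4 : tt = "place"
              · subst f4; simp [pv_prod_beq, beq_iff_eq]
              · by_cases f5 : tt = "transgression"
                · subst f5; simp [pv_prod_beq, beq_iff_eq]
                ·
                  have g1 : ¬ ("person" = tt) := fun h => f1 h.symm
                  have g2 : ¬ ("organization" = tt) := fun h => f2 h.symm
                  have g3 : ¬ ("event" = tt) := fun h => f3 h.symm
                  have g4 : ¬ ("place" = tt) := fun h => f4 h.symm
                  have g5 : ¬ ("transgression" = tt) := fun h => f5 h.symm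
                  simp_all [pv_prod_beq, beq_iff_eq]
      · by_cases e4 : st = "place"
        · subst e4
          by_cases f1 : tt = "person"
          · subst f1; simp [pv_prod_beq, beq_iff_eq]
          · by_cases f2 : tt = "organization"
            · subst f2; simp [pv_prod_beq, beq_iff_eq]
            · by_cases f3 : tt = "event"
              · subst f3; simp [pv_prod_beq, beq_iff_eq]
              · by_cases f4 : tt = "place"
                · subst f4; simp [pv_prod_beq, beq_iff_eq]
                · by_cases f5 : tt = "transgression"
                  · subst f5; simp [pv_prod_beq, beq_iff_eq]
                  ·
                    have g1 : ¬ ("person" = tt) := fun h => f1 h.symm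
                    have g2 : ¬ ("organization" = tt) := fun h => f2 h.symm
                    have g3 : ¬ ("event" = tt) := fun h => f3 h.symm
                    have g4 : ¬ ("place" = tt) := fun h => f4 h.symm
                    have g5 : ¬ ("transgression" = tt) := fun h => f5 h.symm
                    simp_all [pv_prod_beq, beq_iff_eq]
        · by_cases e5 : st = "transgression"
          · subst e5
            by_cases f1 : tt = "person"
            · subst f1; simp [pv_prod_beq, beq_iff_eq]
            · by_cases f2 : tt = "organization"
              · subst f2; simp [pv_prod_beq, beq_iff_eq]
              · by_cases f3 : tt = "event"
                · subst f3; simp [pv_prod_beq, beq_iff_eq]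
                · by_cases f4 : tt = "place"
                  · subst f4; simp [pv_prod_beq, beq_iff_eq]
                  · by_cases f5 : tt = "transgression"
                    · subst f5; simp [pv_prod_beq, beq_iff_eq]
                    ·
                      have g1 : ¬ ("person" = tt) := fun h => f1 h.symm
                      have g2 : ¬ ("organization" = tt) := fun h => f2 h.symm
                      have g3 : ¬ ("event" = tt) := fun h => f3 h.symm
                      have g4 : ¬ ("place" = tt) := fun h => f4 h.symm
                      have g5 : ¬ ("transgression" = tt) := fun h => f5 h.symm
                      simp_all [pv_prod_beq, beq_iff_eq]
          ·
            have g1 : ¬ ("person" = st) := fun h => e1 h.symm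
            have g2 : ¬ ("organization" = st) := fun h => e2 h.symm
            have g3 : ¬ ("event" = st) := fun h => e3 h.symm
            have g4 : ¬ ("place" = st) := fun h => e4 h.symm
            have g5 : ¬ ("transgression" = st) := fun h => e5 h.symm
            simp_all [pv_prod_beq, beq_iff_eq]

-- ===== VERDICT (by name: the statement is the Claim_ definition above) =====
theorem is_valid_relationship_py_spec : Claim_equal_is_valid_relationship_py := by
  intro source target rel_type _
  unfold Spec_is_valid_relationship_py is_valid_relationship_py is_valid_relationship_py_alt
  exact pvCore _ _ _
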